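-- pv_equiv track=rewrite | github.com/Chemokoren/Algorithms-1 | GFG/Arrays/Sorting/sort_array_wave_form.py | my_tests
-- ===== SOURCE A (Python) =====
-- def my_tests(arr):
--     arr.sort()
--     final_arr=[]
--
--     start =0
--     end = len(arr)-1
--
--     while start <= end:
--         final_arr.append(arr[start])
--         start +=1
--
--         # handles the case of an odd array to avoid duplicates
--         if start <= end:
--             final_arr.append(arr[end])
--             end -=1
--     return final_arr
-- ===== SOURCE B (Python) =====
-- def my_tests(arr):
--     arr.sort()
--     n = len(arr)
--     half = (n + 1) // 2
--     result = [None] * n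
--     result[0::2] = arr[:half]          # smallest half at the even positions
--     result[1::2] = arr[half:][::-1]    # largest half, reversed, at the odd positions
--     return result
-- ===== Notes on version B (the rewrite author's own statement) =====
-- stated objective: idiomatic
-- what changed: the element-by-element two-pointer while loop is replaced by whole-slice operations: split the sorted array at the midpoint and scatter the front half onto the even positions and the reversed back half onto the odd positions with extended-slice assignment (no per-element loop)
import Mathlib
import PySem

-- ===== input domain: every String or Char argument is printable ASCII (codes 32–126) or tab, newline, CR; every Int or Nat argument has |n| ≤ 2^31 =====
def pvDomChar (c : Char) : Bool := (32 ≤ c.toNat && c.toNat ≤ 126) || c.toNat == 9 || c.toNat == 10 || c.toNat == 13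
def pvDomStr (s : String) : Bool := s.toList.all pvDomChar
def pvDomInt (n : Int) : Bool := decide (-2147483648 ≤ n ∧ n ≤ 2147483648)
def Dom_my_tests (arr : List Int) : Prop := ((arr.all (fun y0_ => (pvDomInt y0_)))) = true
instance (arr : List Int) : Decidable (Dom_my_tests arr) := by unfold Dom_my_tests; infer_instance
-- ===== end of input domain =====

-- B replaces A's element-by-element two-pointer loop by whole-slice operations: split the
-- sorted array at the midpoint and scatter the halves onto the even/odd positions by
-- extended-slice assignment. Both A and B sort `arr` in place (arr.sort()); the equivalence
-- proved is about the return value.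

-- ===== PORT A =====
-- A's while loop: start/end cursors over the sorted array. All indices reached by the loop
-- are nonnegative and in range, so `getD … 0` is exact there (Python would raise only out of
-- range, which never happens).
def myTestsLoop (s : List Int) (start e : Int) : List Int :=
  if _h : start ≤ e then
    let first := s.getD start.toNat 0
    if _h2 : start + 1 ≤ e then
      first :: s.getD e.toNat 0 :: myTestsLoop s (start + 1) (e - 1)
    else
      [first]
  else []
termination_by (e - start).toNat
decreasing_by omega

def my_tests (arr : List Int) : List Int :=
  let s := PySem.List.sorted arr (fun x => x)
  myTestsLoop s 0 ((s.length : Int) - 1)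

-- ===== PORT B =====
-- `result[i::2] = xs`: write the elements of xs at positions i, i+2, i+4, … (exact here:
-- Python requires len(xs) to equal the number of selected slots, which holds for both
-- assignments in B, so the assignment is exactly this positional overwrite).
def setStep2 (l : List Int) (i : Nat) : List Int → List Int
  | [] => l
  | x :: xs => setStep2 (l.set i x) (i + 2) xs

-- Source B: sort; half = (n+1)//2; result = [None]*n (every slot is overwritten by the two
-- assignments, so an Int placeholder is exact); result[0::2] = arr[:half];
-- result[1::2] = arr[half:][::-1].  arr[:half] = take half, arr[half:][::-1] =
-- reverse (drop half) — exact since 0 ≤ half ≤ n.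
def my_tests_alt (arr : List Int) : List Int :=
  let s := PySem.List.sorted arr (fun x => x)
  let n := s.length
  let half := (n + 1) / 2
  let result := List.replicate n (0 : Int)
  let result := setStep2 result 0 (s.take half)
  let result := setStep2 result 1 ((s.drop half).reverse)
  result

-- ===== PRECONDITION & SPEC =====
def Spec_my_tests (arr : List Int) (out : List Int) : Prop := out = my_tests_alt arr
instance (arr : List Int) (out : List Int) : Decidable (Spec_my_tests arr out) := by unfold Spec_my_tests; infer_instance

-- ===== CLAIM (what is proved, stated in full; the proofs are below) =====
def Claim_equal_my_tests : Prop := ∀ (arr : List Int), Dom_my_tests arr → Spec_my_tests arr (my_tests arr)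

-- ===== LEMMAS AND PROOFS =====

-- closed-form index map both implementations are reduced to
def waveMap (s : List Int) : List Int :=
  (List.range s.length).map (fun i =>
    if i % 2 = 0 then s.getD (i / 2) 0 else s.getD (s.length - 1 - i / 2) 0)

theorem range_succ_succ (m : Nat) :
    List.range (m + 2) = 0 :: 1 :: (List.range m).map (fun i => i + 2) := by
  apply List.ext_getElem (by simp)
  intro n h1 h2
  rcases n with _ | _ | n <;> simp

-- A's loop, characterized: starting at cursors (a, b) with b - a + 1 = m elements remaining,
-- it emits, at offset i < m, s[a + i/2] for even i and s[b - i/2] for odd i.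
theorem myTestsLoop_eq (m : Nat) : ∀ (s : List Int) (a b : Int), 0 ≤ a → b - a + 1 = m →
    myTestsLoop s a b =
      (List.range m).map (fun i =>
        if i % 2 = 0 then s.getD (a.toNat + i / 2) 0 else s.getD (b.toNat - i / 2) 0) := by
  induction m using Nat.strong_induction_on with
  | _ m ih =>
    intro s a b ha hm
    match m, hm with
    | 0, hm =>
      rw [myTestsLoop]
      have : ¬ a ≤ b := by omega
      simp [this]
    | 1, hm =>
      rw [myTestsLoop]
      have h1 : a ≤ b := by omega
      have h2 : ¬ a + 1 ≤ b := by omega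
      have hab : b.toNat = a.toNat := by omega
      simp [h1, h2, List.range_succ, hab]
    | (m + 2), hm =>
      rw [myTestsLoop]
      have h1 : a ≤ b := by omega
      have h2 : a + 1 ≤ b := by omega
      rw [dif_pos h1, dif_pos h2, ih m (by omega) s (a + 1) (b - 1) (by omega) (by omega)]
      rw [range_succ_succ]
      simp only [List.map_cons, List.map_map]
      norm_num
      intro i _
      rcases Nat.even_or_odd i with he | ho
      · have h2a : i % 2 = 0 := Nat.even_iff.mp he
        rw [if_pos h2a, if_pos h2a]
        congr 2
        omega
      · have h2a : i % 2 = 1 := Nat.odd_iff.mp ho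
        rw [if_neg (by omega), if_neg (by omega)]
        congr 2
        omega

theorem setStep2_length (xs : List Int) : ∀ (l : List Int) (i : Nat),
    (setStep2 l i xs).length = l.length := by
  induction xs with
  | nil => intro l i; rfl
  | cons x xs ih => intro l i; rw [setStep2, ih]; simp

-- what setStep2 leaves at position j
theorem setStep2_getD (xs : List Int) : ∀ (l : List Int) (i j : Nat),
    (setStep2 l i xs).getD j 0 =
      if i ≤ j ∧ (j - i) % 2 = 0 ∧ (j - i) / 2 < xs.length ∧ j < l.length then
        xs.getD ((j - i) / 2) 0
      else l.getD j 0 := by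
  induction xs with
  | nil =>
    intro l i j
    rw [if_neg (by rintro ⟨_, _, h, _⟩; simp at h)]
    rfl
  | cons x xs ih =>
    intro l i j
    rw [setStep2, ih]
    simp only [List.length_cons, List.length_set]
    by_cases hc : i + 2 ≤ j ∧ (j - (i + 2)) % 2 = 0 ∧ (j - (i + 2)) / 2 < xs.length ∧ j < l.length
    · rw [if_pos (by omega), if_pos (by omega)]
      have hq : (j - i) / 2 = (j - (i + 2)) / 2 + 1 := by omega
      rw [hq, List.getD_cons_succ]
    · rw [if_neg (by omega)]
      by_cases hj : j = i ∧ j < l.length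
      · rw [if_pos (by simp; omega)]
        obtain ⟨rfl, hjl⟩ := hj
        simp [List.getD_eq_getElem?_getD, hjl]
      · rw [if_neg (by omega)]
        rcases eq_or_ne i j with rfl | hne
        · have : ¬ i < l.length := by omega
          simp [List.getD_eq_getElem?_getD, this]
        · simp [List.getD_eq_getElem?_getD, hne]

-- B computes the same closed-form index map
theorem alt_eq_waveMap_aux (s : List Int) (n half : Nat) (hn : n = s.length)
    (hhalf : half = (n + 1) / 2) :
    setStep2 (setStep2 (List.replicate n (0 : Int)) 0 (s.take half)) 1 ((s.drop half).reverse)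
      = waveMap s := by
  have htake : (s.take half).length = half := by simp; omega
  have hdlen : (s.drop half).length = n - half := by simp; omega
  have hdrop : ((s.drop half).reverse).length = n - half := by simp; omega
  have hlen1 : (setStep2 (List.replicate n (0:Int)) 0 (s.take half)).length = n := by
    rw [setStep2_length]; simp
  unfold waveMap
  apply List.ext_getElem
  · rw [setStep2_length, hlen1]; simp; omega
  intro j hj1 hj2
  rw [setStep2_length, hlen1] at hj1
  rw [← List.getD_eq_getElem _ 0, ← List.getD_eq_getElem _ 0]
  rw [setStep2_getD]
  by_cases hodd : j % 2 = 1
  · -- odd position: element of the reversed back half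
    rw [if_pos (by rw [hdrop, hlen1]; omega)]
    have hk : (j - 1) / 2 < (s.drop half).length := by rw [hdlen]; omega
    rw [List.getD_eq_getElem _ 0 (by rw [hdrop]; rw [hdlen] at hk; omega),
        List.getElem_reverse, List.getElem_drop]
    rw [List.getD_eq_getElem _ 0 (by simp; omega)]
    simp only [List.getElem_map, List.getElem_range]
    rw [if_neg (by omega)]
    rw [List.getD_eq_getElem _ 0 (by omega)]
    congr 1
    rw [hdlen]
    omega
  · -- even position: element of the front half
    rw [if_neg (by rw [hdrop]; omega)]
    rw [setStep2_getD]
    rw [if_pos (by rw [htake]; simp; omega)]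
    rw [List.getD_eq_getElem _ 0 (by rw [htake]; omega)]
    rw [List.getD_eq_getElem _ 0 (by simp; omega)]
    simp only [List.getElem_map, List.getElem_range, List.getElem_take]
    rw [if_pos (by omega)]
    rw [List.getD_eq_getElem _ 0 (by omega)]
    congr 1

theorem alt_eq_waveMap (arr : List Int) :
    my_tests_alt arr = waveMap (PySem.List.sorted arr (fun x => x)) := by
  unfold my_tests_alt
  exact alt_eq_waveMap_aux _ _ _ rfl rfl

-- ===== VERDICT (by name: the statement is the Claim_ definition above) =====
theorem my_tests_spec : Claim_equal_my_tests := by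
  intro arr _
  unfold Spec_my_tests my_tests
  rw [alt_eq_waveMap]
  set s := PySem.List.sorted arr (fun x => x) with hs
  have hB : ((s.length : Int) - 1) - 0 + 1 = (s.length : Nat) := by omega
  rw [myTestsLoop_eq s.length s 0 ((s.length : Int) - 1) (by omega) hB]
  unfold waveMap
  apply List.map_congr_left
  intro i hi
  have hi' : i < s.length := List.mem_range.mp hi
  rcases Nat.even_or_odd i with he | ho
  · have h2a : i % 2 = 0 := Nat.even_iff.mp he
    rw [if_pos h2a, if_pos h2a]
    congr 2
    omega
  · have h2a : i % 2 = 1 := Nat.odd_iff.mp ho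
    rw [if_neg (by omega), if_neg (by omega)]
    congr 2
    omega
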